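-- pv_equiv track=rewrite | github.com/Matan-levintov/Python-Projects | Python Course/loops.py | numbers_letters_count
-- ===== SOURCE A (Python) =====
-- def numbers_letters_count(my_str):
--     CountDigit = 0
--     CountNonDigit = 0
--     for elm in my_str:
--         if elm.isdigit():
--             CountDigit += 1
--         else:
--             CountNonDigit += 1
--     return [CountDigit, CountNonDigit]
-- ===== SOURCE B (Python) =====
-- def numbers_letters_count(my_str):
--     letters = my_str.translate(str.maketrans('', '', '0123456789'))
--     return [len(my_str) - len(letters), len(letters)]
-- ===== Notes on version B (the rewrite author's own statement) =====
-- stated objective: faster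
-- what changed: B has no counter loop: it deletes the ten digit characters with str.translate to build the digit-free string and derives both counts from the two lengths, instead of A's one-pass if/else double counter.
import Mathlib
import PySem

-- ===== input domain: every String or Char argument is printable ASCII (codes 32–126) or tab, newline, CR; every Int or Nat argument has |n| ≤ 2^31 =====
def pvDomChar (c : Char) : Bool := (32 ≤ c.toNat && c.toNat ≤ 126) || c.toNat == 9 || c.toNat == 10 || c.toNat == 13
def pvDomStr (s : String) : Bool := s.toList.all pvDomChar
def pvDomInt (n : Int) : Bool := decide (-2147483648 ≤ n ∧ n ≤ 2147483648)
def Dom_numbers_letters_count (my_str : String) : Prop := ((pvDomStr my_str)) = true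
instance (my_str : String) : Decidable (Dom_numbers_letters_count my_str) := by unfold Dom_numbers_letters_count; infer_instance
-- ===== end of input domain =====

-- B deletes the ten digit characters (str.translate) and derives both counts from string lengths, instead of A's if/else double-counter loop.
-- ===== PORT A =====
-- A: one pass over the string, two counters incremented in if/else
def numbers_letters_count (my_str : String) : List Int :=
  let p := my_str.toList.foldl
    (fun (p : Int × Int) elm =>
      if PySem.Str.isdigit elm then (p.1 + 1, p.2) else (p.1, p.2 + 1))
    (0, 0)
  [p.1, p.2]

-- ===== PORT B =====
-- B: translate-delete the characters of "0123456789" (kept = chars not in that table), then both counts are lengths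
def numbers_letters_count_alt (my_str : String) : List Int :=
  let letters := my_str.toList.filter (fun c => !("0123456789".toList.contains c))
  [PySem.Str.len my_str - (letters.length : Int), (letters.length : Int)]

-- ===== PRECONDITION & SPEC =====
def Spec_numbers_letters_count (my_str : String) (out : List Int) : Prop := out = numbers_letters_count_alt my_str
instance (my_str : String) (out : List Int) : Decidable (Spec_numbers_letters_count my_str out) := by unfold Spec_numbers_letters_count; infer_instance

-- ===== CLAIM (what is proved, stated in full; the proofs are below) =====
def Claim_equal_numbers_letters_count : Prop := ∀ (my_str : String), Dom_numbers_letters_count my_str → Spec_numbers_letters_count my_str (numbers_letters_count my_str)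

-- ===== LEMMAS AND PROOFS =====
-- a character is one of "0123456789" exactly when PySem's isdigit holds
theorem pvDigitMem (c : Char) : ("0123456789".toList.contains c) = PySem.Str.isdigit c := by
  simp only [PySem.Str.isdigit, PySem.Chars.isdigit]
  have h : "0123456789".toList = ['0','1','2','3','4','5','6','7','8','9'] := by decide
  rw [h]
  simp only [List.contains_cons, List.contains_nil, Bool.or_false]
  have e : ∀ d : Char, (c == d) = (c.toNat == d.toNat) := by
    intro d
    rw [Bool.eq_iff_iff]
    constructor
    · intro hx; rw [beq_iff_eq] at hx; simp [hx]
    · intro hx; rw [beq_iff_eq] at hx ⊢; exact Char.ext (UInt32.toNat_inj.mp hx)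
  have le : ∀ a b : Char, (a ≤ b) ↔ a.toNat ≤ b.toNat := fun a b => Iff.rfl
  simp only [e, le]
  rw [Bool.eq_iff_iff]
  simp only [Bool.or_eq_true, beq_iff_eq, Bool.and_eq_true, decide_eq_true_eq,
    show ('0':Char).toNat = 48 from rfl, show ('1':Char).toNat = 49 from rfl,
    show ('2':Char).toNat = 50 from rfl, show ('3':Char).toNat = 51 from rfl,
    show ('4':Char).toNat = 52 from rfl, show ('5':Char).toNat = 53 from rfl,
    show ('6':Char).toNat = 54 from rfl, show ('7':Char).toNat = 55 from rfl,
    show ('8':Char).toNat = 56 from rfl, show ('9':Char).toNat = 57 from rfl]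
  omega

-- A's two-counter fold expressed through countP
theorem pvFoldPair (l : List Char) (d nd : Int) :
    l.foldl (fun (p : Int × Int) elm =>
      if PySem.Str.isdigit elm then (p.1 + 1, p.2) else (p.1, p.2 + 1)) (d, nd)
    = (d + (l.countP PySem.Str.isdigit : Int),
       nd + (l.countP (fun c => ! PySem.Str.isdigit c) : Int)) := by
  induction l generalizing d nd with
  | nil => simp
  | cons c l ih =>
    by_cases h : PySem.Str.isdigit c = true <;>
      simp [h, ih] <;> ring

-- ===== VERDICT (by name: the statement is the Claim_ definition above) =====
theorem numbers_letters_count_spec : Claim_equal_numbers_letters_count := by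
  intro s _
  unfold Spec_numbers_letters_count numbers_letters_count numbers_letters_count_alt
  have hp : (fun c => !("0123456789".toList.contains c))
      = (fun c => ! PySem.Str.isdigit c) := by
    funext c; rw [pvDigitMem]
  have hlen := List.length_eq_countP_add_countP (p := PySem.Str.isdigit) (l := s.toList)
  simp only [decide_not, Bool.decide_eq_true] at hlen
  simp only [pvFoldPair, PySem.Str.len_eq, hp, ← List.countP_eq_length_filter,
    List.cons.injEq, and_true]
  constructor <;> omega
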